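-- pv_equiv track=rewrite | github.com/anik3t11/job-hunter | backend/scrapers/utils.py | location_matches
-- ===== SOURCE A (Python) =====
-- CITY_ALIASES = {
--     "bangalore": ["bengaluru", "blr"],
--     "bengaluru": ["bangalore", "blr"],
--     "mumbai": ["bombay"],
--     "delhi": ["new delhi", "ncr", "delhi ncr"],
--     "hyderabad": ["hyd", "cyberabad"],
--     "chennai": ["madras"],
--     "kolkata": ["calcutta"],
--     "pune": ["pun"],
-- }
--
-- def location_matches(job_location: str, preferred: str) -> bool:
--     jl = job_location.lower()
--     pref = preferred.lower().strip()
--     if pref in jl: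
--         return True
--     for alias in CITY_ALIASES.get(pref, []):
--         if alias in jl:
--             return True
--     for canonical, aliases_list in CITY_ALIASES.items():
--         if pref in aliases_list and canonical in jl:
--             return True
--     return False
-- ===== SOURCE B (Python) =====
-- CITY_ALIASES = {
--     "bangalore": ["bengaluru", "blr"],
--     "bengaluru": ["bangalore", "blr"],
--     "mumbai": ["bombay"],
--     "delhi": ["new delhi", "ncr", "delhi ncr"],
--     "hyderabad": ["hyd", "cyberabad"],
--     "chennai": ["madras"],
--     "kolkata": ["calcutta"],
--     "pune": ["pun"],
-- }
--
-- # Precomputed symmetric equivalence index: every name (canonical or alias)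
-- # maps to the set of all names A would have tried for it.
-- EQUIV = {}
-- for canonical, aliases in CITY_ALIASES.items():
--     EQUIV[canonical] = EQUIV.get(canonical, set()) | set(aliases)
--     for a in aliases:
--         EQUIV[a] = EQUIV.get(a, set()) | {canonical}
--
--
-- def location_matches(job_location: str, preferred: str) -> bool:
--     jl = job_location.lower()
--     pref = preferred.lower().strip()
--     candidates = {pref} | EQUIV.get(pref, set())
--     return any(c in jl for c in candidates)
-- ===== Notes on version B (the rewrite author's own statement) =====
-- stated objective: simpler
-- what changed: Replaces A's three-stage search (substring test, forward alias loop, reverse scan of the whole alias dict) with a single membership pass over a candidate set drawn from a precomputed symmetric equivalence index built once from CITY_ALIASES.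
import Mathlib
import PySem

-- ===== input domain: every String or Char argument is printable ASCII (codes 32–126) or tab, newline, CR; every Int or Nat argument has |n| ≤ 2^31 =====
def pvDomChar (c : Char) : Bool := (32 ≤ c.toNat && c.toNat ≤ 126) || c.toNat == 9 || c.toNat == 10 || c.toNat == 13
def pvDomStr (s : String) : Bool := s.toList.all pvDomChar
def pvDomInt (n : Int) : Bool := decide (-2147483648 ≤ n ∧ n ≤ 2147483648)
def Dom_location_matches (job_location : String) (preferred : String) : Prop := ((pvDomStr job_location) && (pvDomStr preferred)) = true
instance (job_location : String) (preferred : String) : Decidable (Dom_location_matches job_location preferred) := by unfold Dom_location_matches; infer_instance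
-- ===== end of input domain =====

-- B replaces A's three-stage scan (substring test, alias loop, reverse dict scan) with one
-- membership pass over a candidate set from a precomputed symmetric equivalence index (simpler).


-- ===== PORT A =====
def CITY_ALIASES : PySem.Dict String (List String) := PySem.Dict.ofList
  [ ("bangalore", ["bengaluru", "blr"])
  , ("bengaluru", ["bangalore", "blr"])
  , ("mumbai", ["bombay"])
  , ("delhi", ["new delhi", "ncr", "delhi ncr"])
  , ("hyderabad", ["hyd", "cyberabad"])
  , ("chennai", ["madras"])
  , ("kolkata", ["calcutta"])
  , ("pune", ["pun"]) ]

def location_matches (job_location : String) (preferred : String) : Bool :=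
  let jl := PySem.Str.lower job_location
  let pref := PySem.Str.strip (PySem.Str.lower preferred)
  if PySem.Str.isIn pref jl then true
  else if (CITY_ALIASES.getD pref []).any (fun al => PySem.Str.isIn al jl) then true
  else if CITY_ALIASES.items.any (fun p => p.2.contains pref && PySem.Str.isIn p.1 jl) then true
  else false

-- ===== PORT B =====
-- Precomputed symmetric equivalence index (module-level loop in Source B)
def EQUIV : PySem.Dict String (PySem.Set String) :=
  CITY_ALIASES.items.foldl (fun d p =>
    let d := d.insert p.1 ((d.getD p.1 PySem.Set.empty).union (PySem.Set.ofList p.2))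
    p.2.foldl (fun d a => d.insert a ((d.getD a PySem.Set.empty).add p.1)) d)
    PySem.Dict.empty

def location_matches_alt (job_location : String) (preferred : String) : Bool :=
  let jl := PySem.Str.lower job_location
  let pref := PySem.Str.strip (PySem.Str.lower preferred)
  let candidates := (PySem.Set.ofList [pref]).union (EQUIV.getD pref PySem.Set.empty)
  candidates.any (fun c => PySem.Str.isIn c jl)

-- ===== PRECONDITION & SPEC =====
def Spec_location_matches (job_location : String) (preferred : String) (out : Bool) : Prop := out = location_matches_alt job_location preferred
instance (job_location : String) (preferred : String) (out : Bool) : Decidable (Spec_location_matches job_location preferred out) := by unfold Spec_location_matches; infer_instance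

-- ===== CLAIM (what is proved, stated in full; the proofs are below) =====
def Claim_equal_location_matches : Prop := ∀ (job_location : String) (preferred : String), Dom_location_matches job_location preferred → Spec_location_matches job_location preferred (location_matches job_location preferred)

-- ===== LEMMAS AND PROOFS =====
-- per-name case lemmas and the default case, used by `core` below

lemma case_0 (j : String) :
    ((PySem.Set.ofList ["bangalore"]).union (EQUIV.getD "bangalore" PySem.Set.empty)).any (fun c => PySem.Str.isIn c j) =
    (if PySem.Str.isIn "bangalore" j then true
     else if (CITY_ALIASES.getD "bangalore" []).any (fun al => PySem.Str.isIn al j) then true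
     else if CITY_ALIASES.items.any (fun q => q.2.contains "bangalore" && PySem.Str.isIn q.1 j) then true
     else false) := by
  have hc : ((PySem.Set.ofList ["bangalore"]).union (EQUIV.getD "bangalore" PySem.Set.empty)) = ["bangalore", "bengaluru", "blr"] := by rfl
  have ha : CITY_ALIASES.getD "bangalore" [] = ["bengaluru", "blr"] := by rfl
  have hi : CITY_ALIASES.items = [("bangalore", ["bengaluru", "blr"]), ("bengaluru", ["bangalore", "blr"]), ("mumbai", ["bombay"]), ("delhi", ["new delhi", "ncr", "delhi ncr"]), ("hyderabad", ["hyd", "cyberabad"]), ("chennai", ["madras"]), ("kolkata", ["calcutta"]), ("pune", ["pun"])] := by rfl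
  simp only [hc, ha, hi, List.any_cons, List.any_nil]
  norm_num
  cases h0 : PySem.Str.isIn "bangalore" j <;> cases h1 : PySem.Str.isIn "bengaluru" j <;> cases h2 : PySem.Str.isIn "blr" j <;> simp_all

lemma case_1 (j : String) :
    ((PySem.Set.ofList ["bengaluru"]).union (EQUIV.getD "bengaluru" PySem.Set.empty)).any (fun c => PySem.Str.isIn c j) =
    (if PySem.Str.isIn "bengaluru" j then true
     else if (CITY_ALIASES.getD "bengaluru" []).any (fun al => PySem.Str.isIn al j) then true
     else if CITY_ALIASES.items.any (fun q => q.2.contains "bengaluru" && PySem.Str.isIn q.1 j) then true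
     else false) := by
  have hc : ((PySem.Set.ofList ["bengaluru"]).union (EQUIV.getD "bengaluru" PySem.Set.empty)) = ["bengaluru", "bangalore", "blr"] := by rfl
  have ha : CITY_ALIASES.getD "bengaluru" [] = ["bangalore", "blr"] := by rfl
  have hi : CITY_ALIASES.items = [("bangalore", ["bengaluru", "blr"]), ("bengaluru", ["bangalore", "blr"]), ("mumbai", ["bombay"]), ("delhi", ["new delhi", "ncr", "delhi ncr"]), ("hyderabad", ["hyd", "cyberabad"]), ("chennai", ["madras"]), ("kolkata", ["calcutta"]), ("pune", ["pun"])] := by rfl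
  simp only [hc, ha, hi, List.any_cons, List.any_nil]
  norm_num
  cases h0 : PySem.Str.isIn "bengaluru" j <;> cases h1 : PySem.Str.isIn "bangalore" j <;> cases h2 : PySem.Str.isIn "blr" j <;> simp_all

lemma case_2 (j : String) :
    ((PySem.Set.ofList ["blr"]).union (EQUIV.getD "blr" PySem.Set.empty)).any (fun c => PySem.Str.isIn c j) =
    (if PySem.Str.isIn "blr" j then true
     else if (CITY_ALIASES.getD "blr" []).any (fun al => PySem.Str.isIn al j) then true
     else if CITY_ALIASES.items.any (fun q => q.2.contains "blr" && PySem.Str.isIn q.1 j) then true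
     else false) := by
  have hc : ((PySem.Set.ofList ["blr"]).union (EQUIV.getD "blr" PySem.Set.empty)) = ["blr", "bangalore", "bengaluru"] := by rfl
  have ha : CITY_ALIASES.getD "blr" [] = [] := by rfl
  have hi : CITY_ALIASES.items = [("bangalore", ["bengaluru", "blr"]), ("bengaluru", ["bangalore", "blr"]), ("mumbai", ["bombay"]), ("delhi", ["new delhi", "ncr", "delhi ncr"]), ("hyderabad", ["hyd", "cyberabad"]), ("chennai", ["madras"]), ("kolkata", ["calcutta"]), ("pune", ["pun"])] := by rfl
  simp only [hc, ha, hi, List.any_cons, List.any_nil]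
  norm_num
  cases h0 : PySem.Str.isIn "blr" j <;> cases h1 : PySem.Str.isIn "bangalore" j <;> cases h2 : PySem.Str.isIn "bengaluru" j <;> simp_all

lemma case_3 (j : String) :
    ((PySem.Set.ofList ["mumbai"]).union (EQUIV.getD "mumbai" PySem.Set.empty)).any (fun c => PySem.Str.isIn c j) =
    (if PySem.Str.isIn "mumbai" j then true
     else if (CITY_ALIASES.getD "mumbai" []).any (fun al => PySem.Str.isIn al j) then true
     else if CITY_ALIASES.items.any (fun q => q.2.contains "mumbai" && PySem.Str.isIn q.1 j) then true
     else false) := by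
  have hc : ((PySem.Set.ofList ["mumbai"]).union (EQUIV.getD "mumbai" PySem.Set.empty)) = ["mumbai", "bombay"] := by rfl
  have ha : CITY_ALIASES.getD "mumbai" [] = ["bombay"] := by rfl
  have hi : CITY_ALIASES.items = [("bangalore", ["bengaluru", "blr"]), ("bengaluru", ["bangalore", "blr"]), ("mumbai", ["bombay"]), ("delhi", ["new delhi", "ncr", "delhi ncr"]), ("hyderabad", ["hyd", "cyberabad"]), ("chennai", ["madras"]), ("kolkata", ["calcutta"]), ("pune", ["pun"])] := by rfl
  simp only [hc, ha, hi, List.any_cons, List.any_nil]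
  norm_num
  cases h0 : PySem.Str.isIn "mumbai" j <;> cases h1 : PySem.Str.isIn "bombay" j <;> simp_all

lemma case_4 (j : String) :
    ((PySem.Set.ofList ["bombay"]).union (EQUIV.getD "bombay" PySem.Set.empty)).any (fun c => PySem.Str.isIn c j) =
    (if PySem.Str.isIn "bombay" j then true
     else if (CITY_ALIASES.getD "bombay" []).any (fun al => PySem.Str.isIn al j) then true
     else if CITY_ALIASES.items.any (fun q => q.2.contains "bombay" && PySem.Str.isIn q.1 j) then true
     else false) := by
  have hc : ((PySem.Set.ofList ["bombay"]).union (EQUIV.getD "bombay" PySem.Set.empty)) = ["bombay", "mumbai"] := by rfl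
  have ha : CITY_ALIASES.getD "bombay" [] = [] := by rfl
  have hi : CITY_ALIASES.items = [("bangalore", ["bengaluru", "blr"]), ("bengaluru", ["bangalore", "blr"]), ("mumbai", ["bombay"]), ("delhi", ["new delhi", "ncr", "delhi ncr"]), ("hyderabad", ["hyd", "cyberabad"]), ("chennai", ["madras"]), ("kolkata", ["calcutta"]), ("pune", ["pun"])] := by rfl
  simp only [hc, ha, hi, List.any_cons, List.any_nil]
  norm_num
  cases h0 : PySem.Str.isIn "bombay" j <;> cases h1 : PySem.Str.isIn "mumbai" j <;> simp_all

lemma case_5 (j : String) :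
    ((PySem.Set.ofList ["delhi"]).union (EQUIV.getD "delhi" PySem.Set.empty)).any (fun c => PySem.Str.isIn c j) =
    (if PySem.Str.isIn "delhi" j then true
     else if (CITY_ALIASES.getD "delhi" []).any (fun al => PySem.Str.isIn al j) then true
     else if CITY_ALIASES.items.any (fun q => q.2.contains "delhi" && PySem.Str.isIn q.1 j) then true
     else false) := by
  have hc : ((PySem.Set.ofList ["delhi"]).union (EQUIV.getD "delhi" PySem.Set.empty)) = ["delhi", "new delhi", "ncr", "delhi ncr"] := by rfl
  have ha : CITY_ALIASES.getD "delhi" [] = ["new delhi", "ncr", "delhi ncr"] := by rfl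
  have hi : CITY_ALIASES.items = [("bangalore", ["bengaluru", "blr"]), ("bengaluru", ["bangalore", "blr"]), ("mumbai", ["bombay"]), ("delhi", ["new delhi", "ncr", "delhi ncr"]), ("hyderabad", ["hyd", "cyberabad"]), ("chennai", ["madras"]), ("kolkata", ["calcutta"]), ("pune", ["pun"])] := by rfl
  simp only [hc, ha, hi, List.any_cons, List.any_nil]
  norm_num
  cases h0 : PySem.Str.isIn "delhi" j <;> cases h1 : PySem.Str.isIn "new delhi" j <;> cases h2 : PySem.Str.isIn "ncr" j <;> cases h3 : PySem.Str.isIn "delhi ncr" j <;> simp_all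

lemma case_6 (j : String) :
    ((PySem.Set.ofList ["new delhi"]).union (EQUIV.getD "new delhi" PySem.Set.empty)).any (fun c => PySem.Str.isIn c j) =
    (if PySem.Str.isIn "new delhi" j then true
     else if (CITY_ALIASES.getD "new delhi" []).any (fun al => PySem.Str.isIn al j) then true
     else if CITY_ALIASES.items.any (fun q => q.2.contains "new delhi" && PySem.Str.isIn q.1 j) then true
     else false) := by
  have hc : ((PySem.Set.ofList ["new delhi"]).union (EQUIV.getD "new delhi" PySem.Set.empty)) = ["new delhi", "delhi"] := by rfl
  have ha : CITY_ALIASES.getD "new delhi" [] = [] := by rfl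
  have hi : CITY_ALIASES.items = [("bangalore", ["bengaluru", "blr"]), ("bengaluru", ["bangalore", "blr"]), ("mumbai", ["bombay"]), ("delhi", ["new delhi", "ncr", "delhi ncr"]), ("hyderabad", ["hyd", "cyberabad"]), ("chennai", ["madras"]), ("kolkata", ["calcutta"]), ("pune", ["pun"])] := by rfl
  simp only [hc, ha, hi, List.any_cons, List.any_nil]
  norm_num
  cases h0 : PySem.Str.isIn "new delhi" j <;> cases h1 : PySem.Str.isIn "delhi" j <;> simp_all

lemma case_7 (j : String) :
    ((PySem.Set.ofList ["ncr"]).union (EQUIV.getD "ncr" PySem.Set.empty)).any (fun c => PySem.Str.isIn c j) =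
    (if PySem.Str.isIn "ncr" j then true
     else if (CITY_ALIASES.getD "ncr" []).any (fun al => PySem.Str.isIn al j) then true
     else if CITY_ALIASES.items.any (fun q => q.2.contains "ncr" && PySem.Str.isIn q.1 j) then true
     else false) := by
  have hc : ((PySem.Set.ofList ["ncr"]).union (EQUIV.getD "ncr" PySem.Set.empty)) = ["ncr", "delhi"] := by rfl
  have ha : CITY_ALIASES.getD "ncr" [] = [] := by rfl
  have hi : CITY_ALIASES.items = [("bangalore", ["bengaluru", "blr"]), ("bengaluru", ["bangalore", "blr"]), ("mumbai", ["bombay"]), ("delhi", ["new delhi", "ncr", "delhi ncr"]), ("hyderabad", ["hyd", "cyberabad"]), ("chennai", ["madras"]), ("kolkata", ["calcutta"]), ("pune", ["pun"])] := by rfl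
  simp only [hc, ha, hi, List.any_cons, List.any_nil]
  norm_num
  cases h0 : PySem.Str.isIn "ncr" j <;> cases h1 : PySem.Str.isIn "delhi" j <;> simp_all

lemma case_8 (j : String) :
    ((PySem.Set.ofList ["delhi ncr"]).union (EQUIV.getD "delhi ncr" PySem.Set.empty)).any (fun c => PySem.Str.isIn c j) =
    (if PySem.Str.isIn "delhi ncr" j then true
     else if (CITY_ALIASES.getD "delhi ncr" []).any (fun al => PySem.Str.isIn al j) then true
     else if CITY_ALIASES.items.any (fun q => q.2.contains "delhi ncr" && PySem.Str.isIn q.1 j) then true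
     else false) := by
  have hc : ((PySem.Set.ofList ["delhi ncr"]).union (EQUIV.getD "delhi ncr" PySem.Set.empty)) = ["delhi ncr", "delhi"] := by rfl
  have ha : CITY_ALIASES.getD "delhi ncr" [] = [] := by rfl
  have hi : CITY_ALIASES.items = [("bangalore", ["bengaluru", "blr"]), ("bengaluru", ["bangalore", "blr"]), ("mumbai", ["bombay"]), ("delhi", ["new delhi", "ncr", "delhi ncr"]), ("hyderabad", ["hyd", "cyberabad"]), ("chennai", ["madras"]), ("kolkata", ["calcutta"]), ("pune", ["pun"])] := by rfl
  simp only [hc, ha, hi, List.any_cons, List.any_nil]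
  norm_num
  cases h0 : PySem.Str.isIn "delhi ncr" j <;> cases h1 : PySem.Str.isIn "delhi" j <;> simp_all

lemma case_9 (j : String) :
    ((PySem.Set.ofList ["hyderabad"]).union (EQUIV.getD "hyderabad" PySem.Set.empty)).any (fun c => PySem.Str.isIn c j) =
    (if PySem.Str.isIn "hyderabad" j then true
     else if (CITY_ALIASES.getD "hyderabad" []).any (fun al => PySem.Str.isIn al j) then true
     else if CITY_ALIASES.items.any (fun q => q.2.contains "hyderabad" && PySem.Str.isIn q.1 j) then true
     else false) := by
  have hc : ((PySem.Set.ofList ["hyderabad"]).union (EQUIV.getD "hyderabad" PySem.Set.empty)) = ["hyderabad", "hyd", "cyberabad"] := by rfl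
  have ha : CITY_ALIASES.getD "hyderabad" [] = ["hyd", "cyberabad"] := by rfl
  have hi : CITY_ALIASES.items = [("bangalore", ["bengaluru", "blr"]), ("bengaluru", ["bangalore", "blr"]), ("mumbai", ["bombay"]), ("delhi", ["new delhi", "ncr", "delhi ncr"]), ("hyderabad", ["hyd", "cyberabad"]), ("chennai", ["madras"]), ("kolkata", ["calcutta"]), ("pune", ["pun"])] := by rfl
  simp only [hc, ha, hi, List.any_cons, List.any_nil]
  norm_num
  cases h0 : PySem.Str.isIn "hyderabad" j <;> cases h1 : PySem.Str.isIn "hyd" j <;> cases h2 : PySem.Str.isIn "cyberabad" j <;> simp_all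

lemma case_10 (j : String) :
    ((PySem.Set.ofList ["hyd"]).union (EQUIV.getD "hyd" PySem.Set.empty)).any (fun c => PySem.Str.isIn c j) =
    (if PySem.Str.isIn "hyd" j then true
     else if (CITY_ALIASES.getD "hyd" []).any (fun al => PySem.Str.isIn al j) then true
     else if CITY_ALIASES.items.any (fun q => q.2.contains "hyd" && PySem.Str.isIn q.1 j) then true
     else false) := by
  have hc : ((PySem.Set.ofList ["hyd"]).union (EQUIV.getD "hyd" PySem.Set.empty)) = ["hyd", "hyderabad"] := by rfl
  have ha : CITY_ALIASES.getD "hyd" [] = [] := by rfl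
  have hi : CITY_ALIASES.items = [("bangalore", ["bengaluru", "blr"]), ("bengaluru", ["bangalore", "blr"]), ("mumbai", ["bombay"]), ("delhi", ["new delhi", "ncr", "delhi ncr"]), ("hyderabad", ["hyd", "cyberabad"]), ("chennai", ["madras"]), ("kolkata", ["calcutta"]), ("pune", ["pun"])] := by rfl
  simp only [hc, ha, hi, List.any_cons, List.any_nil]
  norm_num
  cases h0 : PySem.Str.isIn "hyd" j <;> cases h1 : PySem.Str.isIn "hyderabad" j <;> simp_all

lemma case_11 (j : String) :
    ((PySem.Set.ofList ["cyberabad"]).union (EQUIV.getD "cyberabad" PySem.Set.empty)).any (fun c => PySem.Str.isIn c j) =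
    (if PySem.Str.isIn "cyberabad" j then true
     else if (CITY_ALIASES.getD "cyberabad" []).any (fun al => PySem.Str.isIn al j) then true
     else if CITY_ALIASES.items.any (fun q => q.2.contains "cyberabad" && PySem.Str.isIn q.1 j) then true
     else false) := by
  have hc : ((PySem.Set.ofList ["cyberabad"]).union (EQUIV.getD "cyberabad" PySem.Set.empty)) = ["cyberabad", "hyderabad"] := by rfl
  have ha : CITY_ALIASES.getD "cyberabad" [] = [] := by rfl
  have hi : CITY_ALIASES.items = [("bangalore", ["bengaluru", "blr"]), ("bengaluru", ["bangalore", "blr"]), ("mumbai", ["bombay"]), ("delhi", ["new delhi", "ncr", "delhi ncr"]), ("hyderabad", ["hyd", "cyberabad"]), ("chennai", ["madras"]), ("kolkata", ["calcutta"]), ("pune", ["pun"])] := by rfl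
  simp only [hc, ha, hi, List.any_cons, List.any_nil]
  norm_num
  cases h0 : PySem.Str.isIn "cyberabad" j <;> cases h1 : PySem.Str.isIn "hyderabad" j <;> simp_all

lemma case_12 (j : String) :
    ((PySem.Set.ofList ["chennai"]).union (EQUIV.getD "chennai" PySem.Set.empty)).any (fun c => PySem.Str.isIn c j) =
    (if PySem.Str.isIn "chennai" j then true
     else if (CITY_ALIASES.getD "chennai" []).any (fun al => PySem.Str.isIn al j) then true
     else if CITY_ALIASES.items.any (fun q => q.2.contains "chennai" && PySem.Str.isIn q.1 j) then true
     else false) := by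
  have hc : ((PySem.Set.ofList ["chennai"]).union (EQUIV.getD "chennai" PySem.Set.empty)) = ["chennai", "madras"] := by rfl
  have ha : CITY_ALIASES.getD "chennai" [] = ["madras"] := by rfl
  have hi : CITY_ALIASES.items = [("bangalore", ["bengaluru", "blr"]), ("bengaluru", ["bangalore", "blr"]), ("mumbai", ["bombay"]), ("delhi", ["new delhi", "ncr", "delhi ncr"]), ("hyderabad", ["hyd", "cyberabad"]), ("chennai", ["madras"]), ("kolkata", ["calcutta"]), ("pune", ["pun"])] := by rfl
  simp only [hc, ha, hi, List.any_cons, List.any_nil]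
  norm_num
  cases h0 : PySem.Str.isIn "chennai" j <;> cases h1 : PySem.Str.isIn "madras" j <;> simp_all

lemma case_13 (j : String) :
    ((PySem.Set.ofList ["madras"]).union (EQUIV.getD "madras" PySem.Set.empty)).any (fun c => PySem.Str.isIn c j) =
    (if PySem.Str.isIn "madras" j then true
     else if (CITY_ALIASES.getD "madras" []).any (fun al => PySem.Str.isIn al j) then true
     else if CITY_ALIASES.items.any (fun q => q.2.contains "madras" && PySem.Str.isIn q.1 j) then true
     else false) := by
  have hc : ((PySem.Set.ofList ["madras"]).union (EQUIV.getD "madras" PySem.Set.empty)) = ["madras", "chennai"] := by rfl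
  have ha : CITY_ALIASES.getD "madras" [] = [] := by rfl
  have hi : CITY_ALIASES.items = [("bangalore", ["bengaluru", "blr"]), ("bengaluru", ["bangalore", "blr"]), ("mumbai", ["bombay"]), ("delhi", ["new delhi", "ncr", "delhi ncr"]), ("hyderabad", ["hyd", "cyberabad"]), ("chennai", ["madras"]), ("kolkata", ["calcutta"]), ("pune", ["pun"])] := by rfl
  simp only [hc, ha, hi, List.any_cons, List.any_nil]
  norm_num
  cases h0 : PySem.Str.isIn "madras" j <;> cases h1 : PySem.Str.isIn "chennai" j <;> simp_all

lemma case_14 (j : String) :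
    ((PySem.Set.ofList ["kolkata"]).union (EQUIV.getD "kolkata" PySem.Set.empty)).any (fun c => PySem.Str.isIn c j) =
    (if PySem.Str.isIn "kolkata" j then true
     else if (CITY_ALIASES.getD "kolkata" []).any (fun al => PySem.Str.isIn al j) then true
     else if CITY_ALIASES.items.any (fun q => q.2.contains "kolkata" && PySem.Str.isIn q.1 j) then true
     else false) := by
  have hc : ((PySem.Set.ofList ["kolkata"]).union (EQUIV.getD "kolkata" PySem.Set.empty)) = ["kolkata", "calcutta"] := by rfl
  have ha : CITY_ALIASES.getD "kolkata" [] = ["calcutta"] := by rfl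
  have hi : CITY_ALIASES.items = [("bangalore", ["bengaluru", "blr"]), ("bengaluru", ["bangalore", "blr"]), ("mumbai", ["bombay"]), ("delhi", ["new delhi", "ncr", "delhi ncr"]), ("hyderabad", ["hyd", "cyberabad"]), ("chennai", ["madras"]), ("kolkata", ["calcutta"]), ("pune", ["pun"])] := by rfl
  simp only [hc, ha, hi, List.any_cons, List.any_nil]
  norm_num
  cases h0 : PySem.Str.isIn "kolkata" j <;> cases h1 : PySem.Str.isIn "calcutta" j <;> simp_all

lemma case_15 (j : String) :
    ((PySem.Set.ofList ["calcutta"]).union (EQUIV.getD "calcutta" PySem.Set.empty)).any (fun c => PySem.Str.isIn c j) =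
    (if PySem.Str.isIn "calcutta" j then true
     else if (CITY_ALIASES.getD "calcutta" []).any (fun al => PySem.Str.isIn al j) then true
     else if CITY_ALIASES.items.any (fun q => q.2.contains "calcutta" && PySem.Str.isIn q.1 j) then true
     else false) := by
  have hc : ((PySem.Set.ofList ["calcutta"]).union (EQUIV.getD "calcutta" PySem.Set.empty)) = ["calcutta", "kolkata"] := by rfl
  have ha : CITY_ALIASES.getD "calcutta" [] = [] := by rfl
  have hi : CITY_ALIASES.items = [("bangalore", ["bengaluru", "blr"]), ("bengaluru", ["bangalore", "blr"]), ("mumbai", ["bombay"]), ("delhi", ["new delhi", "ncr", "delhi ncr"]), ("hyderabad", ["hyd", "cyberabad"]), ("chennai", ["madras"]), ("kolkata", ["calcutta"]), ("pune", ["pun"])] := by rfl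
  simp only [hc, ha, hi, List.any_cons, List.any_nil]
  norm_num
  cases h0 : PySem.Str.isIn "calcutta" j <;> cases h1 : PySem.Str.isIn "kolkata" j <;> simp_all

lemma case_16 (j : String) :
    ((PySem.Set.ofList ["pune"]).union (EQUIV.getD "pune" PySem.Set.empty)).any (fun c => PySem.Str.isIn c j) =
    (if PySem.Str.isIn "pune" j then true
     else if (CITY_ALIASES.getD "pune" []).any (fun al => PySem.Str.isIn al j) then true
     else if CITY_ALIASES.items.any (fun q => q.2.contains "pune" && PySem.Str.isIn q.1 j) then true
     else false) := by
  have hc : ((PySem.Set.ofList ["pune"]).union (EQUIV.getD "pune" PySem.Set.empty)) = ["pune", "pun"] := by rfl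
  have ha : CITY_ALIASES.getD "pune" [] = ["pun"] := by rfl
  have hi : CITY_ALIASES.items = [("bangalore", ["bengaluru", "blr"]), ("bengaluru", ["bangalore", "blr"]), ("mumbai", ["bombay"]), ("delhi", ["new delhi", "ncr", "delhi ncr"]), ("hyderabad", ["hyd", "cyberabad"]), ("chennai", ["madras"]), ("kolkata", ["calcutta"]), ("pune", ["pun"])] := by rfl
  simp only [hc, ha, hi, List.any_cons, List.any_nil]
  norm_num
  cases h0 : PySem.Str.isIn "pune" j <;> cases h1 : PySem.Str.isIn "pun" j <;> simp_all

lemma case_17 (j : String) :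
    ((PySem.Set.ofList ["pun"]).union (EQUIV.getD "pun" PySem.Set.empty)).any (fun c => PySem.Str.isIn c j) =
    (if PySem.Str.isIn "pun" j then true
     else if (CITY_ALIASES.getD "pun" []).any (fun al => PySem.Str.isIn al j) then true
     else if CITY_ALIASES.items.any (fun q => q.2.contains "pun" && PySem.Str.isIn q.1 j) then true
     else false) := by
  have hc : ((PySem.Set.ofList ["pun"]).union (EQUIV.getD "pun" PySem.Set.empty)) = ["pun", "pune"] := by rfl
  have ha : CITY_ALIASES.getD "pun" [] = [] := by rfl
  have hi : CITY_ALIASES.items = [("bangalore", ["bengaluru", "blr"]), ("bengaluru", ["bangalore", "blr"]), ("mumbai", ["bombay"]), ("delhi", ["new delhi", "ncr", "delhi ncr"]), ("hyderabad", ["hyd", "cyberabad"]), ("chennai", ["madras"]), ("kolkata", ["calcutta"]), ("pune", ["pun"])] := by rfl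
  simp only [hc, ha, hi, List.any_cons, List.any_nil]
  norm_num
  cases h0 : PySem.Str.isIn "pun" j <;> cases h1 : PySem.Str.isIn "pune" j <;> simp_all

lemma case_default (j p : String) (h0 : ¬ p = "bangalore") (h1 : ¬ p = "bengaluru") (h2 : ¬ p = "blr") (h3 : ¬ p = "mumbai") (h4 : ¬ p = "bombay") (h5 : ¬ p = "delhi") (h6 : ¬ p = "new delhi") (h7 : ¬ p = "ncr") (h8 : ¬ p = "delhi ncr") (h9 : ¬ p = "hyderabad") (h10 : ¬ p = "hyd") (h11 : ¬ p = "cyberabad") (h12 : ¬ p = "chennai") (h13 : ¬ p = "madras") (h14 : ¬ p = "kolkata") (h15 : ¬ p = "calcutta") (h16 : ¬ p = "pune") (h17 : ¬ p = "pun") :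
    ((PySem.Set.ofList [p]).union (EQUIV.getD p PySem.Set.empty)).any (fun c => PySem.Str.isIn c j) =
    (if PySem.Str.isIn p j then true
     else if (CITY_ALIASES.getD p []).any (fun al => PySem.Str.isIn al j) then true
     else if CITY_ALIASES.items.any (fun q => q.2.contains p && PySem.Str.isIn q.1 j) then true
     else false) := by
  have hE : EQUIV.getD p PySem.Set.empty = PySem.Set.empty := by
    rw [show EQUIV = PySem.Dict.mk [("bangalore", PySem.Set.ofList ["bengaluru", "blr"]), ("bengaluru", PySem.Set.ofList ["bangalore", "blr"]), ("blr", PySem.Set.ofList ["bangalore", "bengaluru"]), ("mumbai", PySem.Set.ofList ["bombay"]), ("bombay", PySem.Set.ofList ["mumbai"]), ("delhi", PySem.Set.ofList ["new delhi", "ncr", "delhi ncr"]), ("new delhi", PySem.Set.ofList ["delhi"]), ("ncr", PySem.Set.ofList ["delhi"]), ("delhi ncr", PySem.Set.ofList ["delhi"]), ("hyderabad", PySem.Set.ofList ["hyd", "cyberabad"]), ("hyd", PySem.Set.ofList ["hyderabad"]), ("cyberabad", PySem.Set.ofList ["hyderabad"]), ("chennai", PySem.Set.ofList ["madras"]), ("madras",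 PySem.Set.ofList ["chennai"]), ("kolkata", PySem.Set.ofList ["calcutta"]), ("calcutta", PySem.Set.ofList ["kolkata"]), ("pune", PySem.Set.ofList ["pun"]), ("pun", PySem.Set.ofList ["pune"])] from rfl]
    simp [PySem.Dict.getD, PySem.Dict.get?, List.find?_nil, Ne.symm h0, Ne.symm h1, Ne.symm h2, Ne.symm h3, Ne.symm h4, Ne.symm h5, Ne.symm h6, Ne.symm h7, Ne.symm h8, Ne.symm h9, Ne.symm h10, Ne.symm h11, Ne.symm h12, Ne.symm h13, Ne.symm h14, Ne.symm h15, Ne.symm h16, Ne.symm h17]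
  have ha : CITY_ALIASES.getD p [] = [] := by
    rw [show CITY_ALIASES = PySem.Dict.mk [("bangalore", ["bengaluru", "blr"]), ("bengaluru", ["bangalore", "blr"]), ("mumbai", ["bombay"]), ("delhi", ["new delhi", "ncr", "delhi ncr"]), ("hyderabad", ["hyd", "cyberabad"]), ("chennai", ["madras"]), ("kolkata", ["calcutta"]), ("pune", ["pun"])] from rfl]
    simp [PySem.Dict.getD, PySem.Dict.get?, List.find?_nil, Ne.symm h0, Ne.symm h1, Ne.symm h3, Ne.symm h5, Ne.symm h9, Ne.symm h12, Ne.symm h14, Ne.symm h16]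
  have hi : CITY_ALIASES.items = [("bangalore", ["bengaluru", "blr"]), ("bengaluru", ["bangalore", "blr"]), ("mumbai", ["bombay"]), ("delhi", ["new delhi", "ncr", "delhi ncr"]), ("hyderabad", ["hyd", "cyberabad"]), ("chennai", ["madras"]), ("kolkata", ["calcutta"]), ("pune", ["pun"])] := by rfl
  simp only [hE, ha, hi, List.any_cons, List.any_nil]
  cases h : PySem.Str.isIn p j <;>
    simp_all [PySem.Set.union, PySem.Set.ofList, PySem.Set.update]

theorem core (j p : String) :
    ((PySem.Set.ofList [p]).union (EQUIV.getD p PySem.Set.empty)).any (fun c => PySem.Str.isIn c j) =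
    (if PySem.Str.isIn p j then true
     else if (CITY_ALIASES.getD p []).any (fun al => PySem.Str.isIn al j) then true
     else if CITY_ALIASES.items.any (fun q => q.2.contains p && PySem.Str.isIn q.1 j) then true
     else false) := by
  by_cases h0 : p = "bangalore"
  · subst h0; exact case_0 j
  by_cases h1 : p = "bengaluru"
  · subst h1; exact case_1 j
  by_cases h2 : p = "blr"
  · subst h2; exact case_2 j
  by_cases h3 : p = "mumbai"
  · subst h3; exact case_3 j
  by_cases h4 : p = "bombay"
  · subst h4; exact case_4 j
  by_cases h5 : p = "delhi"
  · subst h5; exact case_5 j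
  by_cases h6 : p = "new delhi"
  · subst h6; exact case_6 j
  by_cases h7 : p = "ncr"
  · subst h7; exact case_7 j
  by_cases h8 : p = "delhi ncr"
  · subst h8; exact case_8 j
  by_cases h9 : p = "hyderabad"
  · subst h9; exact case_9 j
  by_cases h10 : p = "hyd"
  · subst h10; exact case_10 j
  by_cases h11 : p = "cyberabad"
  · subst h11; exact case_11 j
  by_cases h12 : p = "chennai"
  · subst h12; exact case_12 j
  by_cases h13 : p = "madras"
  · subst h13; exact case_13 j
  by_cases h14 : p = "kolkata"
  · subst h14; exact case_14 j
  by_cases h15 : p = "calcutta"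
  · subst h15; exact case_15 j
  by_cases h16 : p = "pune"
  · subst h16; exact case_16 j
  by_cases h17 : p = "pun"
  · subst h17; exact case_17 j
  exact case_default j p h0 h1 h2 h3 h4 h5 h6 h7 h8 h9 h10 h11 h12 h13 h14 h15 h16 h17

-- ===== VERDICT (by name: the statement is the Claim_ definition above) =====
theorem location_matches_spec : Claim_equal_location_matches := by
  intro job pref _
  unfold Spec_location_matches
  simp only [location_matches, location_matches_alt]
  exact (core (PySem.Str.lower job) (PySem.Str.strip (PySem.Str.lower pref))).symm
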